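-- pv_equiv track=rewrite | github.com/rusthon/Rusthon | pythonjs/pythonjs_to_rust.py | _gccasm_to_llvmasm
-- ===== SOURCE A (Python) =====
-- def _gccasm_to_llvmasm(asmcode):
-- 	'''
-- 	tries to convert basic gcc asm syntax to llvm asm syntax,
-- 	TODO fix me
-- 	'''
-- 	r = []
-- 	for i,char in enumerate(asmcode):
-- 		if i+1==len(asmcode): break
-- 		next = asmcode[i+1]
-- 		if next.isdigit() and char == '%':
-- 			r.append( '$' )
-- 		else:
-- 			r.append( char )
-- 	r.append('"')
-- 	a = ''.join(r)
-- 	return a.replace('%%', '%')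
-- ===== SOURCE B (Python) =====
-- def _gccasm_to_llvmasm(asmcode):
-- 	# staged passes over %-delimited segments instead of a per-char scan:
-- 	# each '%' delimiter becomes '$' when its segment starts with a digit,
-- 	# then the last char is dropped, '"' appended, and '%%' collapsed.
-- 	parts = asmcode.split('%')
-- 	t = parts[0] + ''.join(('$' if p[:1].isdigit() else '%') + p for p in parts[1:])
-- 	return (t[:-1] + '"').replace('%%', '%')
-- ===== Notes on version B (the rewrite author's own statement) =====
-- stated objective: faster
-- what changed: Replaces A's per-character index loop with lookahead by staged passes over the %-delimited segments: split on the delimiter, re-join emitting '$' for a delimiter whose segment starts with a digit (else the delimiter itself), then drop the last char, append the closing quote and collapse doubled delimiters.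
import Mathlib
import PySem

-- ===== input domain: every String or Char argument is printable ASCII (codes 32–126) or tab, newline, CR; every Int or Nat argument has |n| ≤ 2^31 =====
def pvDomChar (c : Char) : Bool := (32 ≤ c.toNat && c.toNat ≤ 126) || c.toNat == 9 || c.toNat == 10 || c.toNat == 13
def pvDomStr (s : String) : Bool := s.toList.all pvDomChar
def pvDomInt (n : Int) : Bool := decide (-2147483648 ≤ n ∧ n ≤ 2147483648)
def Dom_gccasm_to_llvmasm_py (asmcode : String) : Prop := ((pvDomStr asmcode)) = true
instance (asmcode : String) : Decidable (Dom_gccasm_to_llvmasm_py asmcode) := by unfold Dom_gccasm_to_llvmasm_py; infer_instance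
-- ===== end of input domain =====

-- B replaces A's per-character index loop with lookahead by staged passes over %-delimited
-- segments (split on '%', re-join with '$'/'%' per delimiter, drop last char, collapse '%%');
-- return values are equal.

-- ===== PORT A =====
-- the for-loop over enumerate(asmcode) with its break, accumulator r
def pvLoopA (cs : List Char) : List (Int × Char) → List Char → List Char
  | [], r => r
  | (i, char) :: rest, r =>
    if i + 1 = (cs.length : Int) then r            -- break
    else
      let next := PySem.List.pyGetD cs (i + 1) ' '  -- asmcode[i+1], always in range on this branch
      if PySem.Chars.isdigit next && char == '%' then pvLoopA cs rest (r ++ ['$'])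
      else pvLoopA cs rest (r ++ [char])

def gccasm_to_llvmasm_py (asmcode : String) : String :=
  let cs := asmcode.toList
  let r := pvLoopA cs (PySem.List.enumerate cs 0) []
  PySem.Str.replace (String.ofList (r ++ ['"'])) "%%" "%"

-- ===== PORT B =====
-- ('$' if p[:1].isdigit() else '%') + p, the per-segment prefix of Source B's join
def pvDelim (p : List Char) : Char :=
  if PySem.Chars.strIsdigit (PySem.Chars.slice p none (some 1)) then '$' else '%'

def gccasm_to_llvmasm_py_alt (asmcode : String) : String :=
  let parts := PySem.Chars.splitOn asmcode.toList ['%']              -- asmcode.split('%')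
  let t := PySem.List.pyGetD parts 0 [] ++                            -- parts[0] +
      PySem.Chars.join [] ((PySem.List.slice parts (some 1) none).map -- ''.join(… for p in parts[1:])
        (fun p => pvDelim p :: p))
  PySem.Str.replace
    (String.ofList (PySem.Chars.slice t none (some (-1)) ++ ['"']))   -- t[:-1] + '"'
    "%%" "%"                                                          -- .replace('%%','%')

-- ===== PRECONDITION & SPEC =====
def Spec_gccasm_to_llvmasm_py (asmcode : String) (out : String) : Prop := out = gccasm_to_llvmasm_py_alt asmcode
instance (asmcode : String) (out : String) : Decidable (Spec_gccasm_to_llvmasm_py asmcode out) := by unfold Spec_gccasm_to_llvmasm_py; infer_instance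

-- ===== CLAIM (what is proved, stated in full; the proofs are below) =====
def Claim_equal_gccasm_to_llvmasm_py : Prop := ∀ (asmcode : String), Dom_gccasm_to_llvmasm_py asmcode → Spec_gccasm_to_llvmasm_py asmcode (gccasm_to_llvmasm_py asmcode)

-- ===== LEMMAS AND PROOFS =====

-- the transformed char: '%' before a digit becomes '$'
def pvF (c d : Char) : Char := if PySem.Chars.isdigit d && c == '%' then '$' else c

-- A's loop body result: pairwise transform, last char dropped
def pvBody : List Char → List Char
  | [] => []
  | [_] => []
  | c :: d :: rest => pvF c d :: pvBody (d :: rest)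

-- full pairwise transform (last char kept unchanged)
def pvMap : List Char → List Char
  | [] => []
  | [c] => [c]
  | c :: d :: rest => pvF c d :: pvMap (d :: rest)

-- the simple recursive form of split-on-'%'
def pvSplit : List Char → List (List Char)
  | [] => [[]]
  | c :: rest =>
    if c = '%' then [] :: pvSplit rest
    else (c :: (pvSplit rest).headD []) :: (pvSplit rest).tail

def pvGtail (parts : List (List Char)) : List Char :=
  (parts.map (fun p => pvDelim p :: p)).flatten

def pvDl (cs : List Char) : Char :=
  match cs with
  | [] => '%'
  | d :: _ => if PySem.Chars.isdigit d then '$' else '%'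

lemma pvSplit_ne_nil (cs : List Char) : pvSplit cs ≠ [] := by
  cases cs with
  | nil => simp [pvSplit]
  | cons c rest => by_cases h : c = '%' <;> simp [pvSplit, h]

lemma pvDelim_nil : pvDelim [] = '%' := by decide

lemma pvDelim_cons (d : Char) (h : List Char) :
    pvDelim (d :: h) = if PySem.Chars.isdigit d then '$' else '%' := by
  have hs : PySem.List.slice (d :: h) none (some 1) = [d] := by
    simp [PySem.List.slice_to]
  by_cases hd : PySem.Chars.isdigit d = true <;>
    simp [pvDelim, PySem.Chars.strIsdigit, PySem.Chars.slice_eq_listSlice, hs, hd]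

lemma pvLoopA_eq (cs : List Char) (l : List Char) (k : Nat) (r : List Char)
    (h : cs.drop k = l) : pvLoopA cs (PySem.List.enumerate l (k : Int)) r = r ++ pvBody l := by
  induction l generalizing k r with
  | nil => simp [PySem.List.enumerate_nil, pvLoopA, pvBody]
  | cons c l' ih =>
    have hk : k < cs.length := by
      by_contra hk
      push Not at hk
      rw [List.drop_eq_nil_of_le hk] at h
      exact (List.cons_ne_nil c l') h.symm
    have hlen : cs.length = k + 1 + l'.length := by
      have h1 := congrArg List.length h
      simp at h1
      omega
    rw [PySem.List.enumerate_cons]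
    by_cases hend : (k : Int) + 1 = (cs.length : Int)
    · have hl' : l' = [] := by
        have h2 : l'.length = 0 := by
          have h3 : ((k : Int)) + 1 = (cs.length : Int) := hend
          push_cast at h3
          omega
        simpa using h2
      subst hl'
      simp [pvLoopA, hend, pvBody]
    · cases l' with
      | nil =>
        exfalso
        apply hend
        simp only [List.length_nil] at hlen
        omega
      | cons d l'' =>
        have hd : PySem.List.pyGetD cs ((k : Int) + 1) ' ' = d := by
          have hget : cs[k + 1]? = some d := by
            rw [← List.getElem?_drop, h]
            rfl
          have hcast : ((k : Int) + 1) = ((k + 1 : Nat) : Int) := by push_cast; ring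
          rw [hcast, PySem.List.pyGetD_natCast, List.getD_eq_getElem?_getD, hget]
          rfl
        have h' : cs.drop (k + 1) = d :: l'' := by
          rw [← List.tail_drop, h]; rfl
        have hcast : ((k : Int) + 1) = ((k + 1 : Nat) : Int) := by push_cast; ring
        by_cases hc : (PySem.Chars.isdigit d && c == '%') = true
        · simp only [pvLoopA, if_neg hend, hd, hc, if_true]
          rw [hcast, ih (k + 1) (r ++ ['$']) h']
          simp [pvBody, pvF, hc]
        · simp only [pvLoopA, if_neg hend, hd, hc]
          rw [hcast, ih (k + 1) (r ++ [c]) h']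
          simp [pvBody, pvF, hc]

-- the fuel-driven splitOn.go for a one-char separator computes pvSplit
lemma pvGo_eq (fuel : Nat) : ∀ (l cur : List Char) (acc : List (List Char)), l.length ≤ fuel →
    PySem.Chars.splitOn.go ['%'] fuel l cur acc
      = acc.reverse ++ ((pvSplit l).modifyHead (cur.reverse ++ ·)) := by
  induction fuel with
  | zero =>
    intro l cur acc hl
    have : l = [] := List.length_eq_zero_iff.mp (Nat.le_zero.mp hl)
    subst this
    simp [PySem.Chars.splitOn.go, pvSplit]
  | succ fuel ih =>
    intro l cur acc hl
    cases l with
    | nil => simp [PySem.Chars.splitOn.go, pvSplit]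
    | cons c rest =>
      obtain ⟨h, t, hht⟩ : ∃ h t, pvSplit rest = h :: t := by
        cases e : pvSplit rest with
        | nil => exact absurd e (pvSplit_ne_nil rest)
        | cons h t => exact ⟨h, t, rfl⟩
      have hlen : rest.length ≤ fuel := by simpa using hl
      by_cases hc : c = '%'
      · subst hc
        have hpre : (['%'] : List Char).isPrefixOf ('%' :: rest) = true := by
          simp [List.isPrefixOf]
        rw [PySem.Chars.splitOn.go]
        simp only [hpre, if_true, List.drop_succ_cons, List.length_singleton, List.drop_zero]
        rw [ih rest [] _ hlen]
        simp [pvSplit, hht]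
      · have hpre : (['%'] : List Char).isPrefixOf (c :: rest) = false := by
          simp [List.isPrefixOf]
          exact fun h => absurd h.symm hc
        rw [PySem.Chars.splitOn.go]
        simp only [hpre, Bool.false_eq_true, if_false]
        rw [ih rest (c :: cur) acc hlen]
        simp [pvSplit, hc, hht]

lemma pvSplitOn_eq (cs : List Char) : PySem.Chars.splitOn cs ['%'] = pvSplit cs := by
  rw [PySem.Chars.splitOn, pvGo_eq (cs.length + 1) cs [] [] (by omega)]
  obtain ⟨h, t, hht⟩ : ∃ h t, pvSplit cs = h :: t := by
    cases e : pvSplit cs with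
    | nil => exact absurd e (pvSplit_ne_nil cs)
    | cons h t => exact ⟨h, t, rfl⟩
  simp [hht]

lemma pvJoin_nil (l : List (List Char)) : PySem.Chars.join [] l = l.flatten := by
  induction l with
  | nil => rfl
  | cons a l ih =>
    cases l with
    | nil => simp [PySem.Chars.join, List.intercalate, List.intersperse]
    | cons b l' =>
      simp only [PySem.Chars.join, List.intercalate] at ih ⊢
      rw [show List.intersperse ([] : List Char) (a :: b :: l')
            = a :: [] :: List.intersperse [] (b :: l') from by simp [List.intersperse]]
      simp [ih]

lemma pvF_ne (c d : Char) (hc : c ≠ '%') : pvF c d = c := by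
  have : (c == '%') = false := by simpa using hc
  simp [pvF, this]

lemma pvF_pct (d : Char) : pvF '%' d = if PySem.Chars.isdigit d then '$' else '%' := by
  simp [pvF]

-- the split/join of B computes the full pairwise transform pvMap
lemma pvL (cs : List Char) :
    ((pvSplit cs).headD [] ++ pvGtail (pvSplit cs).tail = pvMap cs)
    ∧ (pvGtail (pvSplit cs) = pvDl cs :: pvMap cs) := by
  induction cs with
  | nil => simp [pvSplit, pvGtail, pvMap, pvDl, pvDelim_nil]
  | cons c rest ih =>
    obtain ⟨h, t, hht⟩ : ∃ h t, pvSplit rest = h :: t := by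
      cases e : pvSplit rest with
      | nil => exact absurd e (pvSplit_ne_nil rest)
      | cons h t => exact ⟨h, t, rfl⟩
    by_cases hc : c = '%'
    · subst hc
      have hsplit : pvSplit ('%' :: rest) = [] :: pvSplit rest := by simp [pvSplit]
      have hhead : pvMap ('%' :: rest) = pvDl rest :: pvMap rest := by
        cases rest <;> simp [pvMap, pvDl, pvF_pct]
      have hdlp : pvDl ('%' :: rest) = '%' := by
        simp [pvDl, show PySem.Chars.isdigit '%' = false from by decide]
      refine ⟨?_, ?_⟩
      · rw [hsplit, hhead]
        simpa using ih.2
      · rw [hsplit, hdlp, hhead]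
        simp only [pvGtail, List.map_cons, List.flatten_cons, pvDelim_nil]
        rw [← pvGtail, ih.2]
        rfl
    · have hsplit : pvSplit (c :: rest) = (c :: h) :: t := by
        simp [pvSplit, hc, hht]
      have hhead : pvMap (c :: rest) = c :: pvMap rest := by
        cases rest <;> simp [pvMap, pvF_ne c _ hc]
      have hih1 : h ++ (List.map (fun p => pvDelim p :: p) t).flatten = pvMap rest := by
        have := ih.1
        rw [hht] at this
        simpa [pvGtail] using this
      refine ⟨?_, ?_⟩
      · rw [hsplit, hhead]
        simp only [List.headD_cons, List.tail_cons, pvGtail]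
        simp [hih1]
      · rw [hsplit, hhead]
        have hdl : pvDelim (c :: h) = pvDl (c :: rest) := by
          rw [pvDelim_cons]; simp [pvDl]
        simp only [pvGtail, List.map_cons, List.flatten_cons, hdl]
        simp [hih1]

lemma pvDropLast_pvMap (cs : List Char) : (pvMap cs).dropLast = pvBody cs := by
  induction cs with
  | nil => rfl
  | cons c rest ih =>
    cases rest with
    | nil => rfl
    | cons d r' =>
      have hne : pvMap (d :: r') ≠ [] := by
        cases r' <;> simp [pvMap]
      simp only [pvMap, pvBody]
      rw [List.dropLast_cons_of_ne_nil hne, ih]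

-- ===== VERDICT (by name: the statement is the Claim_ definition above) =====
theorem gccasm_to_llvmasm_py_spec : Claim_equal_gccasm_to_llvmasm_py := by
  intro asmcode _
  show gccasm_to_llvmasm_py asmcode = gccasm_to_llvmasm_py_alt asmcode
  have hA : pvLoopA asmcode.toList (PySem.List.enumerate asmcode.toList 0) [] =
      pvBody asmcode.toList := by
    have h0 := pvLoopA_eq asmcode.toList asmcode.toList 0 [] (by simp)
    simpa using h0
  obtain ⟨h, t, hht⟩ : ∃ h t, pvSplit asmcode.toList = h :: t := by
    cases e : pvSplit asmcode.toList with
    | nil => exact absurd e (pvSplit_ne_nil asmcode.toList)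
    | cons h t => exact ⟨h, t, rfl⟩
  have hget : PySem.List.pyGetD (pvSplit asmcode.toList) 0 [] = h := by
    have : ((0 : Int)) = ((0 : Nat) : Int) := rfl
    rw [this, PySem.List.pyGetD_natCast, hht]
    rfl
  have ht : PySem.List.pyGetD (pvSplit asmcode.toList) 0 [] ++
      PySem.Chars.join []
        ((PySem.List.slice (pvSplit asmcode.toList) (some 1) none).map
          (fun p => pvDelim p :: p)) = pvMap asmcode.toList := by
    rw [hget, PySem.List.slice_from_one, pvJoin_nil, ← pvGtail]
    have := (pvL asmcode.toList).1
    rw [hht] at this ⊢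
    simpa using this
  simp only [gccasm_to_llvmasm_py, gccasm_to_llvmasm_py_alt]
  rw [hA, pvSplitOn_eq, ht, PySem.Chars.slice_eq_listSlice, PySem.List.slice_to_neg_one,
    pvDropLast_pvMap]
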